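-- pv_equiv track=rewrite | github.com/isaacholt100/code | cusps/approx.py | max_degree_indices
-- ===== SOURCE A (Python) =====
-- def max_degree_indices(max_degree: int, dimension: int) -> list[list[int]]: # list of all indices to be included as basis functions in the expansion, indices are unique and each one has sum <= max_degree
--     if dimension == 1:
--         return [[i] for i in range(max_degree + 1)]
--
--     indices = []
--     for lower_index in max_degree_indices(max_degree, dimension - 1):
--         s = sum(lower_index)
--         for i in range(max_degree + 1 - s):
--             indices.append([*lower_index.copy(), i])
--     return indices
-- ===== SOURCE B (Python) =====
-- def max_degree_indices(max_degree: int, dimension: int) -> list[list[int]]: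
--     # Iterative bottom-up build: start from dimension 1 and extend one coordinate at a time.
--     result = [[i] for i in range(max_degree + 1)]
--     for _ in range(2, dimension + 1):
--         result = [[*lower, i] for lower in result
--                   for i in range(max_degree + 1 - sum(lower))]
--     return result
-- ===== Notes on version B (the rewrite author's own statement) =====
-- stated objective: alternative
-- what changed: Replaces the recursion on dimension by an explicit iterative bottom-up loop that rebuilds the index list once per extra dimension via a flat comprehension.
import Mathlib
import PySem

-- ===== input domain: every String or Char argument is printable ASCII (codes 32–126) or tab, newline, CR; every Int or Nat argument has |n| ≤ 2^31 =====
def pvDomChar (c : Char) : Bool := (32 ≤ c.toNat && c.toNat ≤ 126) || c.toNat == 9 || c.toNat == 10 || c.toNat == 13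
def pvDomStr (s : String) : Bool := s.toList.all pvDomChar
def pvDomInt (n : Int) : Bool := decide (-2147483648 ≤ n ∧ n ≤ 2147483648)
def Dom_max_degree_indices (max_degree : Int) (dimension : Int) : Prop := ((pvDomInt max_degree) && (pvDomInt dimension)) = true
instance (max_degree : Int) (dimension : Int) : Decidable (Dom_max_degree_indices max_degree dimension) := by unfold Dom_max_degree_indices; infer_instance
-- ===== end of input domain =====

-- B replaces A's recursion on dimension by an explicit iterative bottom-up loop
-- (same output order and cost); return values proved equal for dimension ≥ 1.

-- ===== PORT A =====
-- literal port of A's recursion; the `dimension ≤ 1` guard only makes the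
-- recursion total (Python recurses forever there; excluded by Pre_)
def max_degree_indices (max_degree : Int) (dimension : Int) : List (List Int) :=
  if dimension = 1 then
    (PySem.List.pyRange 0 (max_degree + 1) 1).map (fun i => [i])
  else if dimension ≤ 1 then []
  else
    (max_degree_indices max_degree (dimension - 1)).foldl
      (fun indices lower_index =>
        (PySem.List.pyRange 0 (max_degree + 1 - lower_index.sum) 1).foldl
          (fun indices i => indices ++ [lower_index ++ [i]]) indices)
      []
termination_by dimension.toNat
decreasing_by omega

-- ===== PORT B =====
def max_degree_indices_alt (max_degree : Int) (dimension : Int) : List (List Int) :=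
  (PySem.List.pyRange 2 (dimension + 1) 1).foldl
    (fun result _ =>
      result.flatMap (fun lower =>
        (PySem.List.pyRange 0 (max_degree + 1 - lower.sum) 1).map
          (fun i => lower ++ [i])))
    ((PySem.List.pyRange 0 (max_degree + 1) 1).map (fun i => [i]))

-- ===== PRECONDITION & SPEC =====
-- Pre_ excludes dimension < 1, where Python A recurses forever (RecursionError).
def Pre_max_degree_indices (max_degree : Int) (dimension : Int) : Prop := 1 ≤ dimension
instance (max_degree : Int) (dimension : Int) : Decidable (Pre_max_degree_indices max_degree dimension) := by unfold Pre_max_degree_indices; infer_instance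
def pvWitness_max_degree_indices : Int × Int := (3, 2)

def Spec_max_degree_indices (max_degree : Int) (dimension : Int) (out : List (List Int)) : Prop := out = max_degree_indices_alt max_degree dimension
instance (max_degree : Int) (dimension : Int) (out : List (List Int)) : Decidable (Spec_max_degree_indices max_degree dimension out) := by unfold Spec_max_degree_indices; infer_instance

-- ===== CLAIM (what is proved, stated in full; the proofs are below) =====
def Claim_equal_max_degree_indices : Prop := ∀ (max_degree : Int) (dimension : Int), Dom_max_degree_indices max_degree dimension → Pre_max_degree_indices max_degree dimension → Spec_max_degree_indices max_degree dimension (max_degree_indices max_degree dimension)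

-- ===== LEMMAS AND PROOFS =====

-- one step of either program is the same flatMap
def pvStep (max_degree : Int) (r : List (List Int)) : List (List Int) :=
  r.flatMap (fun lower =>
    (PySem.List.pyRange 0 (max_degree + 1 - lower.sum) 1).map (fun i => lower ++ [i]))

lemma A_step (md d : Int) (hd : 1 < d) :
    max_degree_indices md d = pvStep md (max_degree_indices md (d - 1)) := by
  rw [max_degree_indices]
  rw [if_neg (by omega), if_neg (by omega)]
  simp only [PySem.List.foldl_append_singleton_eq_map]
  rw [PySem.List.foldl_append_eq_flatMap]
  simp [pvStep]

lemma B_unfold (md d : Int) (hd : 1 ≤ d) :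
    max_degree_indices_alt md (d + 1) = pvStep md (max_degree_indices_alt md d) := by
  unfold max_degree_indices_alt
  rw [show d + 1 + 1 = (d + 1) + 1 by ring,
    PySem.List.pyRange_one_succ_right (by omega : (2:Int) ≤ d + 1)]
  rw [List.foldl_append]
  simp [pvStep]

lemma AB_nat (md : Int) : ∀ n : Nat, max_degree_indices md (n + 1) = max_degree_indices_alt md (n + 1) := by
  intro n
  induction n with
  | zero =>
    norm_num only
    rw [max_degree_indices, if_pos rfl]
    unfold max_degree_indices_alt
    rw [show PySem.List.pyRange 2 (1 + 1) 1 = ([] : List Int) from by decide]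
    simp
  | succ k ih =>
    rw [show ((k + 1 : Nat) : Int) = (k : Int) + 1 by push_cast; ring]
    have h1 : ((k:Int) + 1 + 1) - 1 = (k:Int) + 1 := by ring
    rw [A_step md _ (by omega), h1, B_unfold md ((k : Int) + 1) (by omega), ih]

-- ===== VERDICT (by name: the statement is the Claim_ definition above) =====
theorem max_degree_indices_spec : Claim_equal_max_degree_indices := by
  intro md d _ hpre
  unfold Spec_max_degree_indices
  have hd : d = ((d.toNat - 1 : Nat) : Int) + 1 := by
    unfold Pre_max_degree_indices at hpre; omega
  rw [hd]
  exact AB_nat md (d.toNat - 1)
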